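-- pv_equiv track=rewrite | github.com/BakhturinaPolina/The-Romance-Formula-Goodreads-Reviews-BERTopic-Rating-Predictor | archive/unused_code/csv_building_old/final_csv_builder_improved.py | _get_longest_description
-- ===== SOURCE A (Python) =====
-- from typing import Dict, List, Any, Optional, Tuple
--
-- def _get_longest_description(english_editions: List[Dict[str, Any]]) -> str:
--     """Get the longest non-empty description."""
--     descriptions = []
--     for edition in english_editions:
--         description = edition.get('description', '')
--         if description and isinstance(description, str):
--             description = description.strip()
--             if description:
--                 descriptions.append(description)
--
--     if not descriptions:
--         return ''
--
--     return max(descriptions, key=len)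
-- ===== SOURCE B (Python) =====
-- def _get_longest_description(english_editions):
--     """Get the longest non-empty description (rank by length, take the best)."""
--     stripped = [d.strip() if isinstance(d, str) else ''
--                 for d in (e.get('description', '') for e in english_editions)]
--     ranked = sorted((d for d in stripped if d), key=len, reverse=True)
--     return ranked[0] if ranked else ''
-- ===== Notes on version B (the rewrite author's own statement) =====
-- stated objective: alternative
-- what changed: Replaces collect-then-max(key=len) with a ranking pipeline: strip all candidate descriptions, stable-sort the non-empty ones by length descending, and return the first of the ranking (stability of reverse sort preserves max's first-longest tie-break); trades max's O(n) scan for an O(n log n) sort in exchange for a declarative staged pipeline.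
import Mathlib
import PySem

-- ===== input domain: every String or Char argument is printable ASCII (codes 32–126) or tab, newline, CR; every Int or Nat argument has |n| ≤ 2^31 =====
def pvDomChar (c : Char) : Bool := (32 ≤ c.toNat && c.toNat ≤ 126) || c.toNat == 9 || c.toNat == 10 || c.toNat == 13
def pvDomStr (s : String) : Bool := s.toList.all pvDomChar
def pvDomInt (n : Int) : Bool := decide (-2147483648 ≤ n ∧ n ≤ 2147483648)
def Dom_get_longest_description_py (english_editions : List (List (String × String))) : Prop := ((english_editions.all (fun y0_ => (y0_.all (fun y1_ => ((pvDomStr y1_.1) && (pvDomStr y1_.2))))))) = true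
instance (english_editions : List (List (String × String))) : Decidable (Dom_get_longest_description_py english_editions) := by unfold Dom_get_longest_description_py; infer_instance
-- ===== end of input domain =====

-- B replaces A's collect-into-a-list-then-max(key=len) with a ranking pipeline:
-- strip all candidates, stable-sort the non-empty ones by length descending, take the first.

-- ===== PORT A =====
def get_longest_description_py (english_editions : List (List (String × String))) : String :=
  let descriptions : List String :=
    english_editions.foldl (fun acc edition =>
      let description := PySem.Dict.getD (PySem.Dict.mk edition) "description" ""
      if description ≠ "" then
        let d := PySem.Str.strip description
        if d ≠ "" then acc ++ [d] else acc
      else acc) []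
  if descriptions = [] then ""
  else (PySem.List.max? descriptions (fun s => PySem.Str.len s)).getD ""

-- ===== PORT B =====
def get_longest_description_py_alt (english_editions : List (List (String × String))) : String :=
  let stripped : List String :=
    english_editions.map (fun e => PySem.Str.strip (PySem.Dict.getD (PySem.Dict.mk e) "description" ""))
  let ranked : List String :=
    PySem.List.sorted (stripped.filter (fun d => d ≠ "")) (fun s => PySem.Str.len s) true
  match ranked with
  | [] => ""
  | d :: _ => d

-- ===== PRECONDITION & SPEC =====
def Spec_get_longest_description_py (english_editions : List (List (String × String))) (out : String) : Prop := out = get_longest_description_py_alt english_editions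
instance (english_editions : List (List (String × String))) (out : String) : Decidable (Spec_get_longest_description_py english_editions out) := by unfold Spec_get_longest_description_py; infer_instance

-- ===== CLAIM (what is proved, stated in full; the proofs are below) =====
def Claim_equal_get_longest_description_py : Prop := ∀ (english_editions : List (List (String × String))), Dom_get_longest_description_py english_editions → Spec_get_longest_description_py english_editions (get_longest_description_py english_editions)

-- ===== LEMMAS AND PROOFS =====

-- the stripped description of one edition
def pvStripped (edition : List (String × String)) : String :=
  PySem.Str.strip (PySem.Dict.getD (PySem.Dict.mk edition) "description" "")

-- the option-accumulator step of PySem.List.max? with key len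
def pvOpt : Option String → String → Option String := fun acc x =>
  match acc with
  | none => some x
  | some m => if PySem.Str.len m < PySem.Str.len x then some x else some m

-- A's list-building body appends pvStripped e exactly when pvStripped e ≠ ""
lemma pvBodyA (acc : List String) (e : List (String × String)) :
    (let description := PySem.Dict.getD (PySem.Dict.mk e) "description" ""
     if description ≠ "" then
       let d := PySem.Str.strip description
       if d ≠ "" then acc ++ [d] else acc
     else acc)
    = if (fun x => decide (pvStripped x ≠ "")) e = true then acc ++ [pvStripped e] else acc := by
  by_cases h : PySem.Dict.getD (PySem.Dict.mk e) "description" "" = ""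
  · simp [h, pvStripped, show PySem.Str.strip "" = "" from rfl]
  · simp [h, pvStripped]

lemma pvMaxEq (xs : List String) :
    PySem.List.max? xs (fun s => PySem.Str.len s) = xs.foldl pvOpt none := by
  simp only [PySem.List.max?]
  congr 1
  funext acc x
  cases acc <;> rfl

-- stable descending insertion changes the head exactly by the max? step
lemma pvHeadInsertBy (x : String) (ys : List String) :
    (PySem.List.insertBy (fun a b => decide (PySem.Str.len b < PySem.Str.len a)) x ys).head?
      = pvOpt ys.head? x := by
  cases ys with
  | nil => rfl
  | cons y t =>
    simp only [PySem.List.insertBy, pvOpt, List.head?_cons]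
    split_ifs with h h'
    all_goals simp_all
    omega

-- the head of the insertion fold is the max? fold
lemma pvHeadFold (xs : List String) (ys : List String) :
    (xs.foldl (fun acc x => PySem.List.insertBy (fun a b => decide (PySem.Str.len b < PySem.Str.len a)) x acc) ys).head?
      = xs.foldl pvOpt ys.head? := by
  induction xs generalizing ys with
  | nil => rfl
  | cons x t ih =>
    simp only [List.foldl_cons]
    rw [ih, pvHeadInsertBy]

-- A's empty-check-then-max equals B's sort-descending-then-head
lemma pvFinal (l : List String) :
    (if l = [] then "" else (PySem.List.max? l (fun s => PySem.Str.len s)).getD "")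
    = (match PySem.List.sorted l (fun s => PySem.Str.len s) true with
       | [] => ""
       | d :: _ => d) := by
  have hhead : (PySem.List.sorted l (fun s => PySem.Str.len s) true).head?
      = PySem.List.max? l (fun s => PySem.Str.len s) := by
    rw [PySem.List.sorted_rev_eq_foldl_insertBy, pvHeadFold, pvMaxEq]
    rfl
  by_cases h : l = []
  · subst h; rfl
  · rw [if_neg h]
    cases hs : PySem.List.sorted l (fun s => PySem.Str.len s) true with
    | nil => exact absurd ((PySem.List.sorted_eq_nil_iff l _ true).mp hs) h
    | cons d t =>
      rw [hs, List.head?_cons] at hhead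
      rw [← hhead]
      rfl

theorem get_longest_description_py_spec : Claim_equal_get_longest_description_py := by
  intro ee _
  unfold Spec_get_longest_description_py get_longest_description_py get_longest_description_py_alt
  -- rewrite A's list-building fold into filter-of-map form
  have hA : ee.foldl (fun acc edition =>
      let description := PySem.Dict.getD (PySem.Dict.mk edition) "description" ""
      if description ≠ "" then
        let d := PySem.Str.strip description
        if d ≠ "" then acc ++ [d] else acc
      else acc) []
      = (ee.map pvStripped).filter (fun d => decide (d ≠ "")) := by
    have hf : (fun (acc : List String) (edition : List (String × String)) =>
        let description := PySem.Dict.getD (PySem.Dict.mk edition) "description" ""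
        if description ≠ "" then
          let d := PySem.Str.strip description
          if d ≠ "" then acc ++ [d] else acc
        else acc)
        = fun acc e => if (fun x => decide (pvStripped x ≠ "")) e = true then acc ++ [pvStripped e] else acc := by
      funext acc e
      exact pvBodyA acc e
    rw [hf,
      PySem.List.foldl_append_if (fun e => decide (pvStripped e ≠ "")) pvStripped ee []]
    simp [List.filter_map, Function.comp_def]
  show (if (ee.foldl _ [] : List String) = [] then "" else _) = _
  rw [hA]
  exact pvFinal _
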